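-- pv_equiv track=rewrite | github.com/tmdtmd85/EulerProject | 1_30/24.py | find
-- ===== SOURCE A (Python) =====
-- import math
--
-- def find(digits, order):
--     number = len(digits)
--     if number == 1 and order == 1:
--         return digits
--     if order <= math.factorial(number):
--         for i in range(number):
--             if i == 0:
--                 result = find(digits[1:], order)
--             elif i == number - 1:
--                 result = find(digits[:number-1], order)
--             else:
--                 result = find(digits[:i]+digits[i+1:], order)
--
--             if len(result) == 0:
--                 order -= math.factorial(number-1)
--                 continue
--             else:
--                 return [digits[i]] + result
--     else:
--         return []
-- ===== SOURCE B (Python) =====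
-- import math
--
-- def find(digits, order):
--     n = len(digits)
--     f = math.factorial(n)
--     if order < 1 or order > f:
--         return []
--     k = order - 1
--     pool = list(digits)
--     out = []
--     for i in range(n, 0, -1):
--         f //= i
--         idx, k = divmod(k, f)
--         out.append(pool.pop(idx))
--     return out
-- ===== Notes on version B (the rewrite author's own statement) =====
-- stated objective: faster
-- what changed: Replaces A's recursive search (which re-slices the list and repeatedly subtracts factorials to locate each position) by direct factorial-number-system (Lehmer code) decoding: divmod by precomputed factorials selects each index in one step and pops it from a pool.
-- outside the precondition, e.g. on find([], 1): A returns None, B returns []; on find([5], 0): A raises TypeError, B returns []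
import Mathlib
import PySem

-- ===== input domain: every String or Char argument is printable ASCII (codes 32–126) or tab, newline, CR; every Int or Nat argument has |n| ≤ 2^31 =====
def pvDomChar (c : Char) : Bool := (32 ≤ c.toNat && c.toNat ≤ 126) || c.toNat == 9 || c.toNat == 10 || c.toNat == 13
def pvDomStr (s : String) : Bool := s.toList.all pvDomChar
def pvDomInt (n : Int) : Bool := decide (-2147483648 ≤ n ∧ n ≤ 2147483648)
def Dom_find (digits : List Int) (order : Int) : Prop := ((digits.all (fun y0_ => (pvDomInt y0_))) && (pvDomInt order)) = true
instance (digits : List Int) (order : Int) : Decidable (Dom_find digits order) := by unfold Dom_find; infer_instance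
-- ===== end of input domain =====

-- B replaces A's recursive search-with-repeated-factorial-subtraction by direct
-- factorial-number-system (Lehmer code) decoding; objective: faster.

-- ===== PORT A =====
-- Port of A. Python A returns None on digits = [] ∧ order = 1 and raises TypeError
-- (len(None)) for order ≤ 0 on nonempty digits; the port returns [] there; both
-- situations are outside Pre_find. findLoopF is the 'for i in range(number)' loop
-- with the mutable 'order' threaded through; its 'steps' argument and findF's
-- 'fuel' argument only make the same recursion total (fuel > depth always holds
-- at the call sites below); [] at loop exhaustion stands for Python's implicit
-- None (unreachable inside Pre_find).
def findLoopF (f : List Int → Int → List Int) (digits : List Int) (order : Int)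
    (i : Nat) (steps : Nat) : List Int :=
  match steps with
  | 0 => []
  | steps' + 1 =>
    if i < digits.length then
      let result :=
        if i = 0 then f (PySem.List.slice digits (some 1) none) order
        else if i = digits.length - 1 then
          f (PySem.List.slice digits none (some ((digits.length : Int) - 1))) order
        else
          f (PySem.List.slice digits none (some (i : Int)) ++
             PySem.List.slice digits (some ((i : Int) + 1)) none) order
      if result.length = 0 then
        findLoopF f digits (order - (Nat.factorial (digits.length - 1) : Int)) (i + 1) steps'
      else PySem.List.pyGetD digits (i : Int) 0 :: result
    else []

def findF : Nat → List Int → Int → List Int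
  | 0, _, _ => []
  | fuel + 1, digits, order =>
    if digits.length = 1 ∧ order = 1 then digits
    else if order ≤ (Nat.factorial digits.length : Int) then
      findLoopF (findF fuel) digits order 0 digits.length
    else []

def find (digits : List Int) (order : Int) : List Int :=
  findF (digits.length + 1) digits order

-- ===== PORT B =====
-- altLoop is Source B's 'for i in range(n, 0, -1)' loop: i counts down, f is the
-- running factorial, k the remaining Lehmer index, pool the remaining digits;
-- the popped element heads the output (Python appends in iteration order).
def altLoop (pool : List Int) (k f : Int) (i : Nat) : List Int :=
  match i with
  | 0 => []
  | Nat.succ j =>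
    let f' := PySem.Int.floordiv f ((j : Int) + 1)
    let idx := PySem.Int.floordiv k f'
    let k' := PySem.Int.mod k f'
    match PySem.List.pop? pool idx with
    | some (x, rest) => x :: altLoop rest k' f' j
    | none => []  -- pool.pop(idx) IndexError: unreachable under find_alt's guard

def find_alt (digits : List Int) (order : Int) : List Int :=
  let n := digits.length
  let f := (Nat.factorial n : Int)
  if order < 1 ∨ f < order then []
  else altLoop digits (order - 1) f n

-- ===== PRECONDITION & SPEC =====
-- Pre_ excludes digits = [] with order = 1 (A returns None, not a list) and
-- order ≤ 0 (A raises TypeError on nonempty digits and returns None on []).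
def Pre_find (digits : List Int) (order : Int) : Prop :=
  1 ≤ order ∧ ¬(digits = [] ∧ order = 1)
instance (digits : List Int) (order : Int) : Decidable (Pre_find digits order) := by
  unfold Pre_find; infer_instance

def pvWitness_find : List Int × Int := ([1, 2, 3], 3)

def Spec_find (digits : List Int) (order : Int) (out : List Int) : Prop :=
  out = find_alt digits order
instance (digits : List Int) (order : Int) (out : List Int) :
    Decidable (Spec_find digits order out) := by unfold Spec_find; infer_instance

-- ===== CLAIM (what is proved, stated in full; the proofs are below) =====
def Claim_equal_find : Prop := ∀ (digits : List Int) (order : Int),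
  Dom_find digits order → Pre_find digits order →
  Spec_find digits order (find digits order)

-- ===== LEMMAS AND PROOFS =====

theorem altLoop_succ (pool : List Int) (k : Int) (j : Nat)
    (hlen : pool.length = j + 1) (hk0 : 0 ≤ k) (hk : k < ((j + 1).factorial : Int)) :
    ∃ hq : (k / (j.factorial : Int)).toNat < pool.length,
      altLoop pool k ((j + 1).factorial : Int) (j + 1) =
        pool[(k / (j.factorial : Int)).toNat]'hq ::
          altLoop (pool.eraseIdx (k / (j.factorial : Int)).toNat)
            (k % (j.factorial : Int)) (j.factorial : Int) j := by
  have hfpos : (0:Int) < (j.factorial : Int) := by exact_mod_cast j.factorial_pos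
  have hf' : PySem.Int.floordiv ((j+1).factorial : Int) ((j:Int)+1) = (j.factorial : Int) := by
    have h1 : ((j:Int)+1) = ((j+1:Nat):Int) := by push_cast; ring
    rw [h1, PySem.Int.floordiv_natCast]
    norm_cast
    rw [Nat.factorial_succ, Nat.mul_div_cancel_left _ (Nat.succ_pos j)]
  have hidx0 : 0 ≤ k / (j.factorial:Int) := Int.ediv_nonneg hk0 (le_of_lt hfpos)
  have hqlt : k / (j.factorial:Int) < (j:Int)+1 := by
    rw [Int.ediv_lt_iff_lt_mul hfpos]
    calc k < ((j+1).factorial : Int) := hk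
    _ = ((j:Int)+1) * (j.factorial:Int) := by push_cast [Nat.factorial_succ]; ring
  have hq : (k / (j.factorial : Int)).toNat < pool.length := by omega
  refine ⟨hq, ?_⟩
  have hcast : k / (j.factorial:Int) = (((k / (j.factorial:Int)).toNat : Nat) : Int) := by omega
  rw [altLoop]
  simp only [hf', PySem.Int.floordiv_eq_ediv_of_pos hfpos,
    PySem.Int.mod_eq_emod_of_pos hfpos]
  conv_lhs => rw [hcast]
  rw [PySem.List.pop?_natCast pool _ hq]

theorem branch_eq (digits : List Int) (i : Nat) (h : i < digits.length) :
    (if i = 0 then PySem.List.slice digits (some 1) none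
     else if i = digits.length - 1 then
       PySem.List.slice digits none (some ((digits.length : Int) - 1))
     else PySem.List.slice digits none (some (i : Int)) ++
          PySem.List.slice digits (some ((i : Int) + 1)) none)
    = digits.eraseIdx i := by
  rw [List.eraseIdx_eq_take_drop_succ]
  split_ifs with h0 hlast
  · subst h0
    simp [PySem.List.slice_from_one, List.drop_one]
  · have hc : ((digits.length : Int) - 1) = ((digits.length - 1 : Nat) : Int) := by omega
    rw [hc, PySem.List.slice_to_natCast, hlast]
    have hd : digits.drop (digits.length - 1 + 1) = [] := by
      apply List.drop_eq_nil_of_le; omega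
    rw [hd, List.append_nil]
  · have hc : ((i : Int) + 1) = ((i + 1 : Nat) : Int) := by push_cast; ring
    rw [hc, PySem.List.slice_to_natCast, PySem.List.slice_from_natCast]

theorem branch_find_eq (f : List Int → Int → List Int) (digits : List Int)
    (i : Nat) (o : Int) (h : i < digits.length) :
    (if i = 0 then f (PySem.List.slice digits (some 1) none) o
     else if i = digits.length - 1 then
       f (PySem.List.slice digits none (some ((digits.length : Int) - 1))) o
     else f (PySem.List.slice digits none (some (i : Int)) ++
             PySem.List.slice digits (some ((i : Int) + 1)) none) o)
    = f (digits.eraseIdx i) o := by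
  rw [← branch_eq digits i h]
  split_ifs <;> rfl

theorem findF_empty (fuel : Nat) (ds : List Int) (o : Int) (h0 : 0 < fuel)
    (hb : ¬(ds.length = 1 ∧ o = 1)) (hgt : (ds.length.factorial : Int) < o) :
    findF fuel ds o = [] := by
  obtain ⟨fu, rfl⟩ : ∃ fu, fuel = fu + 1 := ⟨fuel - 1, by omega⟩
  rw [findF, if_neg hb, if_neg (by omega)]

theorem findLoop_spec (f : List Int → Int → List Int) (m : Nat) (digits : List Int)
    (hlen : digits.length = m + 1) (hm : 1 ≤ m)
    (IH : ∀ (ds : List Int) (o : Int), ds.length = m → 1 ≤ o →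
        o ≤ (m.factorial : Int) → f ds o = altLoop ds (o - 1) (m.factorial : Int) m)
    (hE : ∀ (ds : List Int) (o : Int), ds.length = m →
        (m.factorial : Int) < o → f ds o = []) :
    ∀ (q i : Nat) (o r : Int), i + q < m + 1 → 1 ≤ o →
      o - 1 = (q : Int) * (m.factorial : Int) + r → 0 ≤ r → r < (m.factorial : Int)
      → ∃ hb : i + q < digits.length,
        findLoopF f digits o i (digits.length - i) =
          digits[i + q]'hb :: altLoop (digits.eraseIdx (i + q)) r (m.factorial : Int) m := by
  intro q
  induction q with
  | zero =>
    intro i o r hiq h1 hdecomp hr0 hr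
    have hb : i + 0 < digits.length := by omega
    refine ⟨hb, ?_⟩
    have hi : i < digits.length := by omega
    have hor : o - 1 = r := by push_cast at hdecomp; omega
    have hsteps : digits.length - i = (digits.length - (i + 1)) + 1 := by omega
    rw [hsteps, findLoopF, if_pos hi]
    simp only [branch_find_eq f digits i o hi]
    have hrl : (digits.eraseIdx i).length = m := by
      rw [List.length_eraseIdx_of_lt hi]; omega
    obtain ⟨j, hj⟩ : ∃ j, m = j + 1 := ⟨m - 1, by omega⟩
    subst hj
    have hfind : f (digits.eraseIdx i) o =
        altLoop (digits.eraseIdx i) (o - 1) ((j + 1).factorial : Int) (j + 1) :=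
      IH _ _ hrl h1 (by omega)
    obtain ⟨hq', hcons⟩ := altLoop_succ (digits.eraseIdx i) (o - 1) j hrl
      (by omega) (by omega)
    have hne : ¬ (f (digits.eraseIdx i) o).length = 0 := by
      rw [hfind, hcons]; simp
    rw [if_neg hne, hfind, hor]
    congr 1
    rw [PySem.List.pyGetD_natCast]
    exact List.getD_eq_getElem digits 0 hb
  | succ q IHq =>
    intro i o r hiq h1 hdecomp hr0 hr
    have hb : i + (q + 1) < digits.length := by omega
    refine ⟨hb, ?_⟩
    have hi : i < digits.length := by omega
    have hfpos : (0:Int) < (m.factorial : Int) := by exact_mod_cast m.factorial_pos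
    have hqnn : (0:Int) ≤ (q : Int) := Int.natCast_nonneg q
    have hd2 : (o - (m.factorial : Int)) - 1 = (q : Int) * (m.factorial : Int) + r := by
      push_cast at hdecomp; linarith
    have hbig : (m.factorial : Int) < o := by nlinarith
    have hsteps : digits.length - i = (digits.length - (i + 1)) + 1 := by omega
    rw [hsteps, findLoopF, if_pos hi]
    simp only [branch_find_eq f digits i o hi]
    have hrl : (digits.eraseIdx i).length = m := by
      rw [List.length_eraseIdx_of_lt hi]; omega
    have hempty : f (digits.eraseIdx i) o = [] := hE _ _ hrl hbig
    rw [hempty]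
    simp only [List.length_nil]
    have hl1 : digits.length - 1 = m := by omega
    rw [hl1]
    obtain ⟨hb', heq⟩ := IHq (i + 1) (o - (m.factorial : Int)) r (by omega)
      (by nlinarith) hd2 hr0 hr
    have hidx : i + (q + 1) = (i + 1) + q := by omega
    simp only [hidx]
    exact heq

theorem findF_eq_altLoop : ∀ (n fuel : Nat) (digits : List Int) (order : Int),
    digits.length = n → n < fuel → 1 ≤ order → order ≤ (n.factorial : Int) →
    findF fuel digits order = altLoop digits (order - 1) (n.factorial : Int) n := by
  intro n
  induction n using Nat.strong_induction_on with
  | _ n IH =>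
    intro fuel digits order hlen hfuel h1 hle
    obtain ⟨fu, rfl⟩ : ∃ fu, fuel = fu + 1 := ⟨fuel - 1, by omega⟩
    cases n with
    | zero =>
      have hd : digits = [] := List.eq_nil_of_length_eq_zero hlen
      subst hd
      have hf : ((0:Nat).factorial : Int) = 1 := by norm_num [Nat.factorial]
      have ho : order = 1 := by omega
      subst ho
      rw [findF]
      norm_num [Nat.factorial]
      rw [findLoopF]
      rfl
    | succ m =>
      by_cases hbase : digits.length = 1 ∧ order = 1
      · rw [findF, if_pos hbase]
        obtain ⟨hl1, ho1⟩ := hbase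
        obtain ⟨x, hx⟩ := List.length_eq_one_iff.mp hl1
        have hm0 : m = 0 := by omega
        subst hm0; subst ho1; subst hx
        rfl
      · have hm1 : 1 ≤ m := by
          by_contra hc
          have hm0 : m = 0 := by omega
          subst hm0
          have hf : (((0:Nat)+1).factorial : Int) = 1 := by norm_num [Nat.factorial]
          exact hbase ⟨by omega, by omega⟩
        rw [findF, if_neg hbase, hlen, if_pos hle]
        have hFpos : (0:Int) < (m.factorial : Int) := by exact_mod_cast m.factorial_pos
        have hk0 : (0:Int) ≤ order - 1 := by omega
        have hcastf : ((m+1).factorial : Int) = ((m:Int)+1) * (m.factorial : Int) := by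
          push_cast [Nat.factorial_succ]; ring
        have hklt : order - 1 < ((m:Int)+1) * (m.factorial : Int) := by
          rw [← hcastf]; omega
        have hq0nn : 0 ≤ (order - 1) / (m.factorial : Int) :=
          Int.ediv_nonneg hk0 hFpos.le
        have hq0lt : (order - 1) / (m.factorial : Int) < (m:Int)+1 :=
          (Int.ediv_lt_iff_lt_mul hFpos).mpr hklt
        have hdec : order - 1 = (((order - 1) / (m.factorial : Int)).toNat : Int) *
            (m.factorial : Int) + (order - 1) % (m.factorial : Int) := by
          rw [Int.toNat_of_nonneg hq0nn]
          have := Int.emod_add_mul_ediv (order - 1) (m.factorial : Int)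
          linarith
        obtain ⟨hb, hloop⟩ := findLoop_spec (findF fu) m digits hlen hm1
          (fun ds o hds h1' hle' => IH m (by omega) fu ds o hds (by omega) h1' hle')
          (fun ds o hds hgt => findF_empty fu ds o (by omega)
            (by rintro ⟨he1, he2⟩; rw [hds] at he1; subst he1; omega)
            (by rw [hds]; exact hgt))
          ((order - 1) / (m.factorial : Int)).toNat 0 order
          ((order - 1) % (m.factorial : Int))
          (by omega) h1 hdec
          (Int.emod_nonneg _ hFpos.ne') (Int.emod_lt_of_pos _ hFpos)
        rw [Nat.sub_zero, hlen] at hloop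
        rw [hloop]
        obtain ⟨hq', hcons⟩ := altLoop_succ digits (order - 1) m hlen hk0
          (by rw [hcastf] at hle ⊢; omega)
        rw [hcons]
        have hz : (0:Nat) + ((order - 1) / (m.factorial : Int)).toNat =
            ((order - 1) / (m.factorial : Int)).toNat := by omega
        simp only [hz]

-- ===== VERDICT (by name: the statement is the Claim_ definition above) =====
theorem find_spec : Claim_equal_find := by
  intro digits order _ hpre
  obtain ⟨h1, h2⟩ := hpre
  unfold Spec_find find_alt
  by_cases hle : order ≤ (Nat.factorial digits.length : Int)
  · rw [if_neg (by omega)]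
    exact findF_eq_altLoop digits.length (digits.length + 1) digits order rfl
      (by omega) h1 hle
  · rw [if_pos (by omega)]
    have hb : ¬(digits.length = 1 ∧ order = 1) := by
      rintro ⟨e1, e2⟩
      rw [e1] at hle
      simp [Nat.factorial] at hle
      omega
    exact findF_empty (digits.length + 1) digits order (by omega) hb (by omega)
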